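-- pv_equiv track=rewrite | github.com/vincenzorm117/CCI_6edition | CCI_6edition/chapter8/9_parens/python/solution.py | parenAnswersAreEqual
-- ===== SOURCE A (Python) =====
-- def parenAnswersAreEqual(solFib, solSet):
--     solFibN, solFibLen, solFibArray = solFib
--     solSetN, solSetLen, solSetArray = solSet
--
--     if solFibN != solSetN or solFibLen != solSetLen:
--         return False
--
--     solSetArraySet = set(solSetArray)
--     for paren in solFibArray:
--         if not(paren in solSetArraySet):
--             return False
--         solSetArraySet.remove(paren)
--
--     return len(solSetArraySet) == 0
-- ===== SOURCE B (Python) =====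
-- def parenAnswersAreEqual(solFib, solSet):
--     solFibN, solFibLen, solFibArray = solFib
--     solSetN, solSetLen, solSetArray = solSet
--
--     if solFibN != solSetN or solFibLen != solSetLen:
--         return False
--
--     fibSet = set(solFibArray)
--     return len(solFibArray) == len(fibSet) and fibSet == set(solSetArray)
-- ===== Notes on version B (the rewrite author's own statement) =====
-- stated objective: simpler
-- what changed: Replaces the build-a-set-then-consume-it-element-by-element loop (with early exit and a final emptiness check) by a loop-free decomposition: build both sets once and return (no duplicates in the fib array) AND (the two sets are equal).
import Mathlib
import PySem

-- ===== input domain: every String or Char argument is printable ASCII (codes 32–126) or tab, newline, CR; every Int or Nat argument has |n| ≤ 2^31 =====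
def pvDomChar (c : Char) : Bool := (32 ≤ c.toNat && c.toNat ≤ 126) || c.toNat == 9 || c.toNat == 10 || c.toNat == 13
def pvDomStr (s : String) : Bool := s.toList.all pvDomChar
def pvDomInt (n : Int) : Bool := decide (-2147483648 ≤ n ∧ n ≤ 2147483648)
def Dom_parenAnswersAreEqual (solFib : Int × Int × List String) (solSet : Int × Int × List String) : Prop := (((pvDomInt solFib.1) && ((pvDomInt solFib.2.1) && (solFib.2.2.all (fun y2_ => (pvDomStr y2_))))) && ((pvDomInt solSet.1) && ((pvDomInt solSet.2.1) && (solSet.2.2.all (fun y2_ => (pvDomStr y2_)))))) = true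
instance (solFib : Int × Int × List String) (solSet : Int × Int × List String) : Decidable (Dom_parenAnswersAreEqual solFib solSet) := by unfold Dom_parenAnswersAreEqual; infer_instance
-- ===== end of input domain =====

-- Port A consumes a set element-by-element with early exit; B builds both sets once and
-- compares them (plus a no-duplicates check on the fib array): simpler, loop-free decomposition.


-- ===== PORT A =====
-- the 'for paren in solFibArray' loop: early-exit on a missing element, remove it otherwise;
-- '.remove' is ported as 'discard', exact here because it runs only after the membership test.
def parenLoopA : List String → PySem.Set String → Bool
  | [], s => PySem.Set.len s == 0
  | paren :: rest, s =>
      if PySem.Set.contains s paren then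
        parenLoopA rest (PySem.Set.discard s paren)
      else false

def parenAnswersAreEqual (solFib : Int × Int × List String) (solSet : Int × Int × List String) : Bool :=
  let (solFibN, solFibLen, solFibArray) := solFib
  let (solSetN, solSetLen, solSetArray) := solSet
  if solFibN != solSetN || solFibLen != solSetLen then false
  else parenLoopA solFibArray (PySem.Set.ofList solSetArray)

-- ===== PORT B =====
def parenAnswersAreEqual_alt (solFib : Int × Int × List String) (solSet : Int × Int × List String) : Bool :=
  let (solFibN, solFibLen, solFibArray) := solFib
  let (solSetN, solSetLen, solSetArray) := solSet
  if solFibN != solSetN || solFibLen != solSetLen then false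
  else
    let fibSet := PySem.Set.ofList solFibArray
    ((solFibArray.length : Int) == PySem.Set.len fibSet)
      && PySem.Set.equal fibSet (PySem.Set.ofList solSetArray)

-- ===== PRECONDITION & SPEC =====
def Spec_parenAnswersAreEqual (solFib : Int × Int × List String) (solSet : Int × Int × List String) (out : Bool) : Prop := out = parenAnswersAreEqual_alt solFib solSet
instance (solFib : Int × Int × List String) (solSet : Int × Int × List String) (out : Bool) : Decidable (Spec_parenAnswersAreEqual solFib solSet out) := by unfold Spec_parenAnswersAreEqual; infer_instance

-- ===== CLAIM (what is proved, stated in full; the proofs are below) =====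
def Claim_equal_parenAnswersAreEqual : Prop := ∀ (solFib : Int × Int × List String) (solSet : Int × Int × List String), Dom_parenAnswersAreEqual solFib solSet → Spec_parenAnswersAreEqual solFib solSet (parenAnswersAreEqual solFib solSet)

-- ===== LEMMAS AND PROOFS =====

-- A's loop succeeds iff the fib array has no duplicates and has exactly s's members.
lemma parenLoopA_iff (fib : List String) (s : PySem.Set String) (hs : s.Nodup) :
    parenLoopA fib s = true ↔ fib.Nodup ∧ ∀ x, x ∈ fib ↔ x ∈ s := by
  induction fib generalizing s with
  | nil =>
      simp only [parenLoopA, PySem.Set.len, List.nodup_nil, true_and, List.not_mem_nil,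
        false_iff, beq_iff_eq, Int.natCast_eq_zero, List.length_eq_zero_iff]
      constructor
      · intro h; simp [h]
      · intro h; exact List.eq_nil_iff_forall_not_mem.mpr h
  | cons p rest ih =>
      by_cases hp : p ∈ s
      · rw [parenLoopA, if_pos ((PySem.Set.contains_iff _ _).mpr hp),
          ih _ (PySem.Set.nodup_discard s p hs)]
        constructor
        · rintro ⟨hnd, hmem⟩
          have hpr : p ∉ rest := fun h => by
            have := (hmem p).mp h
            rw [PySem.Set.mem_discard s p p] at this
            exact this.2 rfl
          refine ⟨List.nodup_cons.mpr ⟨hpr, hnd⟩, fun x => ?_⟩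
          simp only [List.mem_cons]
          constructor
          · rintro (rfl | hx)
            · exact hp
            · exact ((PySem.Set.mem_discard s p x).mp ((hmem x).mp hx)).1
          · intro hx
            by_cases hxp : x = p
            · exact Or.inl hxp
            · exact Or.inr ((hmem x).mpr ((PySem.Set.mem_discard s p x).mpr ⟨hx, hxp⟩))
        · rintro ⟨hnd, hmem⟩
          obtain ⟨hpr, hnd'⟩ := List.nodup_cons.mp hnd
          refine ⟨hnd', fun x => ?_⟩
          rw [PySem.Set.mem_discard s p x]
          constructor
          · intro hx
            exact ⟨(hmem x).mp (List.mem_cons_of_mem _ hx), fun h => hpr (h ▸ hx)⟩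
          · rintro ⟨hx, hxp⟩
            rcases List.mem_cons.mp ((hmem x).mpr hx) with rfl | h
            · exact absurd rfl hxp
            · exact h
      · rw [parenLoopA, if_neg (by simpa using (mt (PySem.Set.contains_iff s p).mp hp))]
        simp only [Bool.false_eq_true, false_iff, not_and]
        intro _ hmem
        exact hp ((hmem p).mp (List.mem_cons_self ..))

-- B's no-duplicates check: len(xs) == len(set(xs)) iff xs has no duplicates.
lemma length_ofList_eq_iff (xs : List String) :
    (PySem.Set.ofList xs).length = xs.length ↔ xs.Nodup := by
  induction xs using List.reverseRecOn with
  | nil => simp [PySem.Set.ofList]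
  | append_singleton ys x ih =>
      rw [PySem.Set.ofList_append_singleton]
      by_cases hx : x ∈ ys
      · rw [PySem.Set.add_of_mem (by simpa [PySem.Set.mem_ofList] using hx)]
        have hle := PySem.Set.length_ofList_le (xs := ys)
        simp only [List.length_append, List.length_cons, List.length_nil, List.nodup_append,
          List.nodup_singleton]
        constructor
        · intro h; omega
        · intro h
          exact absurd rfl (h.2.2 x hx x (List.mem_singleton_self x))
      · rw [PySem.Set.add_of_not_mem (by simpa [PySem.Set.mem_ofList] using hx)]
        simp only [List.length_append, List.length_cons, List.length_nil]
        rw [List.nodup_append]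
        constructor
        · intro h
          refine ⟨ih.mp (by omega), List.nodup_singleton x, ?_⟩
          intro a ha b hb
          simp only [List.mem_singleton] at hb
          subst hb
          exact fun e => hx (e ▸ ha)
        · rintro ⟨h, -, -⟩
          have := ih.mpr h; omega

lemma altBody_iff (fib arr : List String) :
    (((fib.length : Int) == PySem.Set.len (PySem.Set.ofList fib))
      && PySem.Set.equal (PySem.Set.ofList fib) (PySem.Set.ofList arr)) = true
      ↔ fib.Nodup ∧ ∀ x, x ∈ fib ↔ x ∈ arr := by
  rw [Bool.and_eq_true, PySem.Set.equal_iff]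
  simp only [PySem.Set.len, beq_iff_eq, PySem.Set.mem_ofList]
  constructor
  · rintro ⟨h1, h2⟩
    exact ⟨(length_ofList_eq_iff fib).mp (by omega), h2⟩
  · rintro ⟨h1, h2⟩
    exact ⟨by rw [(length_ofList_eq_iff fib).mpr h1], h2⟩

-- ===== VERDICT (by name: the statement is the Claim_ definition above) =====
theorem parenAnswersAreEqual_spec : Claim_equal_parenAnswersAreEqual := by
  intro ⟨fN, fL, fA⟩ ⟨sN, sL, sA⟩ _
  unfold Spec_parenAnswersAreEqual parenAnswersAreEqual parenAnswersAreEqual_alt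
  simp only
  split
  · rfl
  · rw [Bool.eq_iff_iff,
      parenLoopA_iff fA (PySem.Set.ofList sA) (PySem.Set.nodup_ofList sA),
      altBody_iff fA sA]
    simp [PySem.Set.mem_ofList]
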